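-- pv_equiv track=rewrite | github.com/rlankin/advent-of-code | 2017/day3.py | traverse_shell
-- ===== SOURCE A (Python) =====
-- def traverse_shell(s, target):
--     l = (s * 2) + 1
--     square = l ** 2
--     coords = [s, -s]
--
--     if square == target:
--         return coords
--
--     # Left
--     for i in range(1, l):
--         coords[0] -= 1
--         square -= 1
--         if square == target:
--             return coords
--     # Up
--     for i in range(1, l):
--         coords[1] += 1
--         square -= 1
--         if square == target:
--             return coords
--     # Right
--     for i in range(1, l):
--         coords[0] += 1
--         square -= 1
--         if square == target:
--             return coords
--     # Down
--     for i in range(1, l):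
--         coords[1] -= 1
--         square -= 1
--         if square == target:
--             return coords
-- ===== SOURCE B (Python) =====
-- def traverse_shell(s, target):
--     l = 2 * s + 1
--     t = l * l - target  # offset backwards along the ring from the bottom-right corner
--     if t == 0:
--         return [s, -s]
--     n = 2 * s  # steps per side
--     if n <= 0 or t < 1 or t > 4 * n:
--         return None
--     side, r = divmod(t - 1, n)
--     r += 1
--     if side == 0:
--         return [s - r, -s]
--     if side == 1:
--         return [-s, -s + r]
--     if side == 2:
--         return [-s + r, s]
--     return [s, s - r]
-- ===== Notes on version B (the rewrite author's own statement) =====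
-- stated objective: faster
-- what changed: Replaces the four step-by-step walk loops around the ring with O(1) arithmetic: compute the backward offset from the corner value and pick side and position with divmod.
import Mathlib
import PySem

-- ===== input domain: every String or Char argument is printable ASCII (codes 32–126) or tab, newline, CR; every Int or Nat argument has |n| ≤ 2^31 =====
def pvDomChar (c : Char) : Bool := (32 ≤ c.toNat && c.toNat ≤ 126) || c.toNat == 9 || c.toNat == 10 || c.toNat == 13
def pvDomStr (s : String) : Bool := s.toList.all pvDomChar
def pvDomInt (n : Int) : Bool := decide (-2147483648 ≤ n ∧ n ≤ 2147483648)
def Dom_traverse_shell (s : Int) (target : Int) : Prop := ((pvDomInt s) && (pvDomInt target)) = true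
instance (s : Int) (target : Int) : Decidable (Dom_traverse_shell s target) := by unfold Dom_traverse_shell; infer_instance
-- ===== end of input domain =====

-- B replaces A's step-by-step walk around the spiral ring with direct divmod arithmetic.

-- ===== PORT A =====
-- one `for i in range(1, l)` side walk: each step moves coords by (dx,dy) and decrements square;
-- .inl = the loop's early `return coords` when square == target, .inr = the state after the loop
def sideLoop (dx dy : Int) : Nat → Int → Int → Int → Int → (List Int) ⊕ (Int × Int × Int)
  | 0, x, y, sq, _ => .inr (x, y, sq)
  | n+1, x, y, sq, target =>
      let x' := x + dx
      let y' := y + dy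
      let sq' := sq - 1
      if sq' = target then .inl [x', y'] else sideLoop dx dy n x' y' sq' target

def traverse_shell (s : Int) (target : Int) : Option (List Int) :=
  let l := s * 2 + 1
  let square := l ^ 2
  if square = target then some [s, -s] else
  match sideLoop (-1) 0 (l - 1).toNat s (-s) square target with   -- Left
  | .inl c => some c
  | .inr (x, y, sq) =>
  match sideLoop 0 1 (l - 1).toNat x y sq target with             -- Up
  | .inl c => some c
  | .inr (x, y, sq) =>
  match sideLoop 1 0 (l - 1).toNat x y sq target with             -- Right
  | .inl c => some c
  | .inr (x, y, sq) =>
  match sideLoop 0 (-1) (l - 1).toNat x y sq target with          -- Down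
  | .inl c => some c
  | .inr _ => none

-- ===== PORT B =====
def traverse_shell_alt (s : Int) (target : Int) : Option (List Int) :=
  let l := 2 * s + 1
  let t := l * l - target
  if t = 0 then some [s, -s] else
  let n := 2 * s
  if n ≤ 0 ∨ t < 1 ∨ t > 4 * n then none else
  let side := PySem.Int.floordiv (t - 1) n
  let r := PySem.Int.mod (t - 1) n + 1
  if side = 0 then some [s - r, -s]
  else if side = 1 then some [-s, -s + r]
  else if side = 2 then some [-s + r, s]
  else some [s, s - r]

-- ===== PRECONDITION & SPEC =====
def Spec_traverse_shell (s : Int) (target : Int) (out : Option (List Int)) : Prop := out = traverse_shell_alt s target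
instance (s : Int) (target : Int) (out : Option (List Int)) : Decidable (Spec_traverse_shell s target out) := by unfold Spec_traverse_shell; infer_instance

-- ===== CLAIM (what is proved, stated in full; the proofs are below) =====
def Claim_equal_traverse_shell : Prop := ∀ (s : Int) (target : Int), Dom_traverse_shell s target → Spec_traverse_shell s target (traverse_shell s target)

-- ===== LEMMAS AND PROOFS =====

-- closed form of one side walk: square strictly decreases by 1 each step, so target is hit
-- exactly when 1 ≤ sq - target ≤ n, at step sq - target
theorem sideLoop_eq (dx dy : Int) (n : Nat) (x y sq target : Int) :
    sideLoop dx dy n x y sq target =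
      if 1 ≤ sq - target ∧ sq - target ≤ (n : Int) then
        .inl [x + (sq - target) * dx, y + (sq - target) * dy]
      else .inr (x + (n : Int) * dx, y + (n : Int) * dy, sq - (n : Int)) := by
  induction n generalizing x y sq with
  | zero =>
      simp only [sideLoop, Nat.cast_zero]
      rw [if_neg (by omega)]
      norm_num
  | succ n ih =>
      simp only [sideLoop]
      by_cases h : sq - 1 = target
      · rw [if_pos h, if_pos (by push_cast; omega)]
        have : sq - target = 1 := by omega
        rw [this]; ring_nf
      · rw [if_neg h, ih]
        by_cases h2 : 1 ≤ sq - target ∧ sq - target ≤ ((n + 1 : Nat) : Int)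
        · rw [if_pos (by push_cast at h2 ⊢; omega), if_pos h2]
          have : sq - 1 - target = sq - target - 1 := by ring
          rw [this]; ring_nf
        · rw [if_neg (by push_cast at h2 ⊢; omega), if_neg h2]
          push_cast; ring_nf

-- closed form of A's whole walk, with m = the per-side step count (l-1 clipped at 0)
theorem traverse_shell_closed (s target : Int) (m : Int) (hm : m = ((s * 2 + 1 - 1).toNat : Int)) :
    traverse_shell s target =
      (let t := (2 * s + 1) * (2 * s + 1) - target
      if t = 0 then some [s, -s]
      else if 1 ≤ t ∧ t ≤ m then some [s - t, -s]
      else if 1 ≤ t - m ∧ t - m ≤ m then some [s - m, -s + (t - m)]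
      else if 1 ≤ t - 2*m ∧ t - 2*m ≤ m then some [s - m + (t - 2*m), -s + m]
      else if 1 ≤ t - 3*m ∧ t - 3*m ≤ m then some [s, -s + m - (t - 3*m)]
      else none) := by
  obtain ⟨t, rfl⟩ : ∃ t, target = (2 * s + 1) * (2 * s + 1) - t :=
    ⟨(2 * s + 1) * (2 * s + 1) - target, by ring⟩
  unfold traverse_shell
  simp only [sideLoop_eq, ← hm]
  rw [show (s * 2 + 1) ^ 2 = (2 * s + 1) * (2 * s + 1) from by ring]
  generalize (2 * s + 1) * (2 * s + 1) = S
  simp only [show S - (S - t) = t from by ring]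
  by_cases h0 : t = 0
  · simp [h0]
  rw [if_neg (by omega), if_neg h0]
  by_cases c1 : 1 ≤ t ∧ t ≤ m
  · simp only [if_pos c1, Option.some.injEq, List.cons.injEq, and_true]
    constructor <;> ring
  simp only [if_neg c1]
  by_cases c2 : 1 ≤ t - m ∧ t - m ≤ m
  · simp only [if_pos (show 1 ≤ S - m - (S - t) ∧ S - m - (S - t) ≤ m from by omega), if_pos c2,
      Option.some.injEq, List.cons.injEq, and_true]
    constructor <;> ring
  simp only [if_neg (show ¬(1 ≤ S - m - (S - t) ∧ S - m - (S - t) ≤ m) from by omega), if_neg c2]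
  by_cases c3 : 1 ≤ t - 2*m ∧ t - 2*m ≤ m
  · simp only [if_pos (show 1 ≤ S - m - m - (S - t) ∧ S - m - m - (S - t) ≤ m from by omega),
      if_pos c3, Option.some.injEq, List.cons.injEq, and_true]
    constructor <;> ring
  simp only [if_neg (show ¬(1 ≤ S - m - m - (S - t) ∧ S - m - m - (S - t) ≤ m) from by omega),
    if_neg c3]
  by_cases c4 : 1 ≤ t - 3*m ∧ t - 3*m ≤ m
  · simp only [if_pos (show 1 ≤ S - m - m - m - (S - t) ∧ S - m - m - m - (S - t) ≤ m from by omega),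
      if_pos c4, Option.some.injEq, List.cons.injEq, and_true]
    constructor <;> ring
  simp only [if_neg (show ¬(1 ≤ S - m - m - m - (S - t) ∧ S - m - m - m - (S - t) ≤ m) from by omega),
    if_neg c4]

theorem traverse_shell_eq_alt (s target : Int) :
    traverse_shell s target = traverse_shell_alt s target := by
  rw [traverse_shell_closed s target _ rfl]
  unfold traverse_shell_alt
  obtain ⟨t, rfl⟩ : ∃ t, target = (2 * s + 1) * (2 * s + 1) - t :=
    ⟨(2 * s + 1) * (2 * s + 1) - target, by ring⟩
  simp only [show ∀ S : Int, S - (S - t) = t from fun S => by ring]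
  by_cases hs : s ≤ 0
  · have hm : ((s * 2 + 1 - 1).toNat : Int) = 0 := by omega
    rw [hm]
    by_cases h0 : t = 0
    · rw [if_pos h0, if_pos h0]
    · rw [if_neg h0, if_neg h0, if_neg (by omega), if_neg (by omega), if_neg (by omega),
        if_neg (by omega), if_pos (by omega)]
  · have hm : ((s * 2 + 1 - 1).toNat : Int) = 2 * s := by omega
    have hpos : (0 : Int) < 2 * s := by omega
    rw [hm]
    by_cases h0 : t = 0
    · rw [if_pos h0, if_pos h0]
    rw [if_neg h0, if_neg h0]
    by_cases c1 : 1 ≤ t ∧ t ≤ 2 * s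
    · have hf : PySem.Int.floordiv (t - 1) (2 * s) = 0 :=
        (PySem.Int.floordiv_eq_iff_of_pos hpos).mpr ⟨by omega, by omega⟩
      have hr : PySem.Int.mod (t - 1) (2 * s) = t - 1 := by
        have he := PySem.Int.floordiv_eq_ediv_of_pos (a := t - 1) hpos
        have hq : (t - 1) / (2 * s) = 0 := by rw [← he, hf]
        have hd := Int.emod_add_ediv (t - 1) (2 * s)
        rw [hq] at hd
        rw [PySem.Int.mod_eq_emod_of_pos hpos]
        omega
      rw [if_pos c1, if_neg (by omega), if_pos hf, hr]
      simp only [Option.some.injEq, List.cons.injEq, eq_self_iff_true, true_and, and_true]; omega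
    rw [if_neg c1]
    by_cases c2 : 1 ≤ t - 2 * s ∧ t - 2 * s ≤ 2 * s
    · have hf : PySem.Int.floordiv (t - 1) (2 * s) = 1 :=
        (PySem.Int.floordiv_eq_iff_of_pos hpos).mpr ⟨by omega, by omega⟩
      have hr : PySem.Int.mod (t - 1) (2 * s) = t - 1 - 2 * s := by
        have he := PySem.Int.floordiv_eq_ediv_of_pos (a := t - 1) hpos
        have hq : (t - 1) / (2 * s) = 1 := by rw [← he, hf]
        have hd := Int.emod_add_ediv (t - 1) (2 * s)
        rw [hq] at hd
        rw [PySem.Int.mod_eq_emod_of_pos hpos]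
        omega
      rw [if_pos (by omega), if_neg (by omega),
        if_neg (by rw [hf]; omega), if_pos hf, hr]
      simp only [Option.some.injEq, List.cons.injEq, eq_self_iff_true, true_and, and_true]; omega
    rw [if_neg (by omega)]
    by_cases c3 : 1 ≤ t - 4 * s ∧ t - 4 * s ≤ 2 * s
    · have hf : PySem.Int.floordiv (t - 1) (2 * s) = 2 :=
        (PySem.Int.floordiv_eq_iff_of_pos hpos).mpr ⟨by omega, by omega⟩
      have hr : PySem.Int.mod (t - 1) (2 * s) = t - 1 - 4 * s := by
        have he := PySem.Int.floordiv_eq_ediv_of_pos (a := t - 1) hpos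
        have hq : (t - 1) / (2 * s) = 2 := by rw [← he, hf]
        have hd := Int.emod_add_ediv (t - 1) (2 * s)
        rw [hq] at hd
        rw [PySem.Int.mod_eq_emod_of_pos hpos]
        omega
      rw [if_pos (by omega), if_neg (by omega), if_neg (by rw [hf]; omega),
        if_neg (by rw [hf]; omega), if_pos hf, hr]
      simp only [Option.some.injEq, List.cons.injEq, eq_self_iff_true, true_and, and_true]; omega
    rw [if_neg (by omega)]
    by_cases c4 : 1 ≤ t - 6 * s ∧ t - 6 * s ≤ 2 * s
    · have hf : PySem.Int.floordiv (t - 1) (2 * s) = 3 :=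
        (PySem.Int.floordiv_eq_iff_of_pos hpos).mpr ⟨by omega, by omega⟩
      have hr : PySem.Int.mod (t - 1) (2 * s) = t - 1 - 6 * s := by
        have he := PySem.Int.floordiv_eq_ediv_of_pos (a := t - 1) hpos
        have hq : (t - 1) / (2 * s) = 3 := by rw [← he, hf]
        have hd := Int.emod_add_ediv (t - 1) (2 * s)
        rw [hq] at hd
        rw [PySem.Int.mod_eq_emod_of_pos hpos]
        omega
      rw [if_pos (by omega), if_neg (by omega), if_neg (by rw [hf]; omega),
        if_neg (by rw [hf]; omega), if_neg (by rw [hf]; omega), hr]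
      simp only [Option.some.injEq, List.cons.injEq, eq_self_iff_true, true_and, and_true]; omega
    rw [if_neg (by omega), if_pos (by omega)]

-- ===== VERDICT (by name: the statement is the Claim_ definition above) =====
theorem traverse_shell_spec : Claim_equal_traverse_shell := by
  intro s target _
  unfold Spec_traverse_shell
  exact traverse_shell_eq_alt s target
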